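-- pv_equiv track=rewrite | github.com/jonasRower/EN_Words | EN_Words/Python/pripravCsv.py | vratIndexyMeziKterymiJeDanePismeno
-- ===== SOURCE A (Python) =====
-- def vratIndexyMeziKterymiJeDanePismeno(poleRadkuVety, pismenoExp, posunO):
--
--     sekceZac = -1
--     sekceKon = -1
--
--     for i in range(0, len(poleRadkuVety)):
--         radek = poleRadkuVety[i]
--
--         if(radek == ""):
--             if(sekceZac == -1):
--                 radekSPismenem = poleRadkuVety[i+1]
--                 if(radekSPismenem == pismenoExp):
--                     sekceZac = i + 2
--             else:
--                 sekceKon = i-1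
--                 break
--
--     if(sekceKon == -1):
--         sekceKon = len(poleRadkuVety)
--
--     sekceZacKonStr = pismenoExp + ',' + str(sekceZac + posunO) + ',' + str(sekceKon + posunO)
--
--
--     return(sekceZacKonStr)
-- ===== SOURCE B (Python) =====
-- def vratIndexyMeziKterymiJeDanePismeno(poleRadkuVety, pismenoExp, posunO):
--     # Pre-collect indices of empty lines, then scan only those:
--     # the section starts after the first empty line followed by pismenoExp,
--     # and ends just before the next empty line (or at the end of the list).
--     prazdne = [i for i, radek in enumerate(poleRadkuVety) if radek == ""]
--     sekceZac = -1
--     sekceKon = len(poleRadkuVety)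
--     for k, idx in enumerate(prazdne):
--         if poleRadkuVety[idx + 1] == pismenoExp:
--             sekceZac = idx + 2
--             if k + 1 < len(prazdne):
--                 sekceKon = prazdne[k + 1] - 1
--             break
--     return pismenoExp + ',' + str(sekceZac + posunO) + ',' + str(sekceKon + posunO)
-- ===== Notes on version B (the rewrite author's own statement) =====
-- stated objective: alternative
-- what changed: B first builds the list of empty-line indices with one comprehension and then scans only those indices (checking the line after each) instead of A's single stateful scan over all lines with sentinel values and a post-loop fixup; the section end is taken directly from the next empty index.
import Mathlib
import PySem

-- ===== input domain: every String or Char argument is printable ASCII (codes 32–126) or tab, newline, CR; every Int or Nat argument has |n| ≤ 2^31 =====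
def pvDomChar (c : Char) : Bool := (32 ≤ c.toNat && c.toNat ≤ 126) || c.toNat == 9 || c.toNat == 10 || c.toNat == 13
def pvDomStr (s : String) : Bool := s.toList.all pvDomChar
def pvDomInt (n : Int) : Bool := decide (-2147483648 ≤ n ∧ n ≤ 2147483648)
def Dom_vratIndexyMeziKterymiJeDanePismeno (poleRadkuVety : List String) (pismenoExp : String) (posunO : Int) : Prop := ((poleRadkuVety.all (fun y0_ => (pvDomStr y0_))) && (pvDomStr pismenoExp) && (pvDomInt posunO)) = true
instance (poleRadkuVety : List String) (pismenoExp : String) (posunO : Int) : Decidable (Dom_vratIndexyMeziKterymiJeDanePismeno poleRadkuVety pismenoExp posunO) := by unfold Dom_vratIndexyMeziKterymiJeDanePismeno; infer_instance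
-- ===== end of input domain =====

-- B replaces A's stateful scan over all lines by: collect the empty-line indices, then scan
-- only those; a structurally different decomposition of the same linear search (objective: alternative).

-- ===== PORT A =====
-- A's for-loop over i in range(len(...)); 'break' = the early return in the z ≠ -1 branch.
-- poleRadkuVety[i+1] is read with pyGet? (none = IndexError) and defaulted: exact inside Pre_.
def aLoop (all : List String) (p : String) (i : Nat) (z : Int) : Int × Int :=
  if h : i < all.length then
    let radek := all[i]
    if radek = "" then
      if z = -1 then
        let radekSPismenem := (PySem.List.pyGet? all ((i : Int) + 1)).getD ""
        if radekSPismenem = p then aLoop all p (i + 1) ((i : Int) + 2)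
        else aLoop all p (i + 1) z
      else (z, (i : Int) - 1)          -- sekceKon = i - 1; break
    else aLoop all p (i + 1) z
  else (z, -1)
termination_by all.length - i

def vratIndexyMeziKterymiJeDanePismeno (poleRadkuVety : List String) (pismenoExp : String) (posunO : Int) : String :=
  let zk := aLoop poleRadkuVety pismenoExp 0 (-1)
  let sekceZac := zk.1
  let sekceKon := if zk.2 = -1 then (poleRadkuVety.length : Int) else zk.2
  pismenoExp ++ "," ++ PySem.Int.toStr (sekceZac + posunO) ++ "," ++ PySem.Int.toStr (sekceKon + posunO)

-- ===== PORT B =====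
-- Source B's loop over the pre-collected list 'prazdne'; prazdne[k+1] is the head of the remaining
-- list 'rest'. poleRadkuVety[idx+1] read with pyGet? and defaulted: exact inside Pre_.
def bScan (all : List String) (p : String) (n : Int) : List Int → Int × Int
  | [] => (-1, n)
  | idx :: rest =>
    if (PySem.List.pyGet? all (idx + 1)).getD "" = p then
      (idx + 2, match rest with | [] => n | nxt :: _ => nxt - 1)
    else bScan all p n rest

def vratIndexyMeziKterymiJeDanePismeno_alt (poleRadkuVety : List String) (pismenoExp : String) (posunO : Int) : String :=
  let prazdne := (PySem.List.enumerate poleRadkuVety).filterMap (fun q => if q.2 = "" then some q.1 else none)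
  let zk := bScan poleRadkuVety pismenoExp (poleRadkuVety.length : Int) prazdne
  pismenoExp ++ "," ++ PySem.Int.toStr (zk.1 + posunO) ++ "," ++ PySem.Int.toStr (zk.2 + posunO)

-- ===== PRECONDITION & SPEC =====
-- Pre_ excludes exactly the inputs where Python A raises IndexError (reading poleRadkuVety[i+1]
-- for a final empty line reached before any section start was found); Python B raises there too.
def Pre_vratIndexyMeziKterymiJeDanePismeno (poleRadkuVety : List String) (pismenoExp : String) (posunO : Int) : Prop :=
  poleRadkuVety.getLast? = some "" →
    ∃ j < poleRadkuVety.length - 1, poleRadkuVety[j]? = some "" ∧ poleRadkuVety[j + 1]? = some pismenoExp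
instance (poleRadkuVety : List String) (pismenoExp : String) (posunO : Int) : Decidable (Pre_vratIndexyMeziKterymiJeDanePismeno poleRadkuVety pismenoExp posunO) := by unfold Pre_vratIndexyMeziKterymiJeDanePismeno; infer_instance

def pvWitness_vratIndexyMeziKterymiJeDanePismeno : List String × String × Int := (["", "a", "cat", "", "b"], "a", 3)

def Spec_vratIndexyMeziKterymiJeDanePismeno (poleRadkuVety : List String) (pismenoExp : String) (posunO : Int) (out : String) : Prop := out = vratIndexyMeziKterymiJeDanePismeno_alt poleRadkuVety pismenoExp posunO
instance (poleRadkuVety : List String) (pismenoExp : String) (posunO : Int) (out : String) : Decidable (Spec_vratIndexyMeziKterymiJeDanePismeno poleRadkuVety pismenoExp posunO out) := by unfold Spec_vratIndexyMeziKterymiJeDanePismeno; infer_instance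

-- ===== CLAIM (what is proved, stated in full; the proofs are below) =====
def Claim_equal_vratIndexyMeziKterymiJeDanePismeno : Prop := ∀ (poleRadkuVety : List String) (pismenoExp : String) (posunO : Int), Dom_vratIndexyMeziKterymiJeDanePismeno poleRadkuVety pismenoExp posunO → Pre_vratIndexyMeziKterymiJeDanePismeno poleRadkuVety pismenoExp posunO → Spec_vratIndexyMeziKterymiJeDanePismeno poleRadkuVety pismenoExp posunO (vratIndexyMeziKterymiJeDanePismeno poleRadkuVety pismenoExp posunO)

-- ===== LEMMAS AND PROOFS =====

-- the empty-line indices of 'all' that are ≥ i, ascending (proof-only helper)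
def emptiesFrom (all : List String) (i : Nat) : List Int :=
  if h : i < all.length then
    (if all[i] = "" then ((i : Int) :: emptiesFrom all (i + 1)) else emptiesFrom all (i + 1))
  else []
termination_by all.length - i

theorem emptiesFrom_ge (all : List String) (i : Nat) :
    ∀ j ∈ emptiesFrom all i, (i : Int) ≤ j := by
  fun_induction emptiesFrom all i with
  | case1 i h hemp ih =>
    intro j hj
    rcases List.mem_cons.mp hj with rfl | hj
    · exact le_refl _
    · have := ih j hj; omega
  | case2 i h hemp ih => intro j hj; have := ih j hj; omega
  | case3 i h => intro j hj; simp at hj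

theorem filterMap_enumerate_eq_emptiesFrom_aux (all : List String) (i : Nat) (hi : i ≤ all.length) :
    (PySem.List.enumerate (all.drop i) (i : Int)).filterMap (fun q => if q.2 = "" then some q.1 else none)
      = emptiesFrom all i := by
  fun_induction emptiesFrom all i with
  | case1 i h hemp ih =>
    rw [List.drop_eq_getElem_cons h, PySem.List.enumerate_cons]
    simp only [List.filterMap_cons, hemp]
    have := ih (by omega); push_cast at this
    simp [this]
  | case2 i h hemp ih =>
    rw [List.drop_eq_getElem_cons h, PySem.List.enumerate_cons]
    simp only [List.filterMap_cons, if_neg hemp]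
    have := ih (by omega); push_cast at this
    rw [this]
  | case3 i h =>
    rw [List.drop_eq_nil_of_le (by omega)]
    simp [PySem.List.enumerate]

theorem aLoop_found (all : List String) (p : String) (i : Nat) (z : Int) (hz : z ≠ -1) :
    aLoop all p i z = (z, match emptiesFrom all i with | [] => -1 | j :: _ => j - 1) := by
  fun_induction emptiesFrom all i with
  | case1 i h hemp ih =>
    rw [aLoop]
    simp only [dif_pos h, hemp, if_neg hz]
    rfl
  | case2 i h hemp ih =>
    rw [aLoop]
    simp only [dif_pos h, if_neg hemp]
    exact ih
  | case3 i h =>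
    rw [aLoop]
    simp only [dif_neg h]

theorem bScan_eq_aLoop (all : List String) (p : String) (i : Nat) :
    bScan all p (all.length : Int) (emptiesFrom all i)
      = ((aLoop all p i (-1)).1,
         if (aLoop all p i (-1)).2 = -1 then (all.length : Int) else (aLoop all p i (-1)).2) := by
  fun_induction emptiesFrom all i with
  | case1 i h hemp ih =>
    rw [aLoop]
    simp only [dif_pos h, hemp, if_pos rfl, bScan]
    by_cases hp : (PySem.List.pyGet? all ((i : Int) + 1)).getD "" = p
    · simp only [if_pos hp]
      rw [aLoop_found all p (i+1) ((i:Int)+2) (by omega)]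
      rcases he : emptiesFrom all (i+1) with _ | ⟨j, rest⟩
      · norm_num
      · have hj : (i + 1 : Int) ≤ j := emptiesFrom_ge all (i+1) j (by rw [he]; exact List.mem_cons_self ..)
        have hne : (j - 1 : Int) ≠ -1 := by omega
        simp [hne]
    · simp only [if_neg hp]
      exact ih
  | case2 i h hemp ih =>
    rw [aLoop]
    simp only [dif_pos h, if_neg hemp]
    exact ih
  | case3 i h =>
    rw [aLoop]
    simp only [dif_neg h]
    simp [bScan]

theorem filterMap_enumerate_eq_emptiesFrom (all : List String) :
    (PySem.List.enumerate all).filterMap (fun q => if q.2 = "" then some q.1 else none)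
      = emptiesFrom all 0 := by
  have := filterMap_enumerate_eq_emptiesFrom_aux all 0 (by omega)
  simpa [PySem.List.enumerate] using this

-- ===== VERDICT (by name: the statement is the Claim_ definition above) =====
theorem vratIndexyMeziKterymiJeDanePismeno_spec : Claim_equal_vratIndexyMeziKterymiJeDanePismeno := by
  intro all p o _ _
  unfold Spec_vratIndexyMeziKterymiJeDanePismeno
  unfold vratIndexyMeziKterymiJeDanePismeno vratIndexyMeziKterymiJeDanePismeno_alt
  simp only []
  rw [filterMap_enumerate_eq_emptiesFrom, bScan_eq_aLoop]
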